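-- pv_equiv track=rewrite | github.com/takeda0120/gakumasu | code/pattern.py | sum_dict_combinations
-- ===== SOURCE A (Python) =====
-- from itertools import combinations
--
-- def sum_dict_combinations(input_dict):
--     results = {}
--
--     # 全てのキーのリストを取得
--     keys = list(input_dict.keys())
--     for combo in combinations(keys, 5):
--         combo_sum = sum(input_dict[key] for key in combo)
--         combo_str = ','.join(sorted(combo))  # キーを文字列として結合し、ソート
--         results[combo_sum] = results.get(combo_sum, []) + [combo_str]
--
--     # 1から全てのキーの数までの組み合わせを考える
--     # n = 6
--     # for r in range(1,n):
--     #     for combo in combinations(keys, r):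
--     #         combo_sum = sum(input_dict[key] for key in combo)
--     #         combo_str = ','.join(sorted(combo))  # キーを文字列として結合し、ソート
--     #         results[combo_sum] = results.get(combo_sum, []) + [combo_str]
--
--     return results
-- ===== SOURCE B (Python) =====
-- from itertools import combinations
--
-- def sum_dict_combinations(input_dict):
--     # Alternative decomposition: enumerate all (sum, combo_str) pairs in one flat
--     # pass, then group by distinct sums in first-appearance order via filtering.
--     keys = list(input_dict)
--     pairs = [(sum(input_dict[k] for k in combo), ','.join(sorted(combo)))
--              for combo in combinations(keys, 5)]
--     order = list(dict.fromkeys(s for s, _ in pairs))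
--     return {s: [t for u, t in pairs if u == s] for s in order}
-- ===== Notes on version B (the rewrite author's own statement) =====
-- stated objective: alternative
-- what changed: A groups incrementally in one pass, mutating a hash dict per combination via get-then-reassign with list concatenation; B first materialises the flat list of sum/combo-string pairs, takes the distinct sums in first-appearance order, and builds each group by filtering the pairs list.
import Mathlib
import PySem

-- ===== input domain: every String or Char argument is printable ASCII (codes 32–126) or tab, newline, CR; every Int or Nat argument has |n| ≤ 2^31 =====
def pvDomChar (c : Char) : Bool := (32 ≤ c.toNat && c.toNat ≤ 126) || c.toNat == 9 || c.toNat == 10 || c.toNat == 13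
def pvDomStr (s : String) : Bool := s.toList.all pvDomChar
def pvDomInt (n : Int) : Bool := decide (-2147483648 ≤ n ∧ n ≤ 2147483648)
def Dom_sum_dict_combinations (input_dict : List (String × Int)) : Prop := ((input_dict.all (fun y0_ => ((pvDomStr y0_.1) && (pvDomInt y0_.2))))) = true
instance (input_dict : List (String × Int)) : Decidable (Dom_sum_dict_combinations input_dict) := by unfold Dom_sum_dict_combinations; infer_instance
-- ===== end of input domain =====

-- B replaces A's incremental hash-grouping loop by a flat enumerate-then-group decomposition
-- (pairs list, distinct sums in first-appearance order, per-sum filter); objective: alternative.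


-- ===== PORT A =====
-- literal port of A: fold over combinations(keys, 5), growing results[combo_sum] by get-then-assign.
-- input_dict[key] is read with getD _ 0: every key comes from the dict's own key list, so the lookup
-- never misses and the default is never used (exact).
def sum_dict_combinations (input_dict : List (String × Int)) : List (Int × List String) :=
  let d := PySem.Dict.ofList input_dict
  let keys := d.keys
  let results := (PySem.List.combinations keys 5).foldl
    (fun r combo =>
      let combo_sum := (combo.map (fun k => d.getD k 0)).sum
      let combo_str := PySem.Str.join "," (PySem.List.sorted combo (fun x => x) false)
      r.insert combo_sum (r.getD combo_sum [] ++ [combo_str]))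
    PySem.Dict.empty
  results.items

-- ===== PORT B =====
-- port of B: build the flat (combo_sum, combo_str) pairs list, take the distinct sums in
-- first-appearance order (dict.fromkeys), and emit each sum with the filter of its pairs.
def sum_dict_combinations_alt (input_dict : List (String × Int)) : List (Int × List String) :=
  let d := PySem.Dict.ofList input_dict
  let keys := d.keys
  let pairs := (PySem.List.combinations keys 5).map
    (fun combo =>
      ((combo.map (fun k => d.getD k 0)).sum,
       PySem.Str.join "," (PySem.List.sorted combo (fun x => x) false)))
  let order := PySem.List.dedup (pairs.map (fun p => p.1))
  order.map (fun s => (s, (pairs.filter (fun p => p.1 == s)).map (fun p => p.2)))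

-- ===== PRECONDITION & SPEC =====
def Spec_sum_dict_combinations (input_dict : List (String × Int)) (out : List (Int × List String)) : Prop := out = sum_dict_combinations_alt input_dict
instance (input_dict : List (String × Int)) (out : List (Int × List String)) : Decidable (Spec_sum_dict_combinations input_dict out) := by unfold Spec_sum_dict_combinations; infer_instance

-- ===== CLAIM (what is proved, stated in full; the proofs are below) =====
def Claim_equal_sum_dict_combinations : Prop := ∀ (input_dict : List (String × Int)), Dom_sum_dict_combinations input_dict → Spec_sum_dict_combinations input_dict (sum_dict_combinations input_dict)

-- ===== LEMMAS AND PROOFS =====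

-- A's grouping fold over any pairs list yields exactly B's dedup-then-filter items list.
theorem pv_group_items (pairs : List (Int × String)) :
    (pairs.foldl (fun r p => r.insert p.1 (r.getD p.1 [] ++ [p.2]))
        (PySem.Dict.empty : PySem.Dict Int (List String))).items
      = (PySem.List.dedup (pairs.map (fun p => p.1))).map
          (fun s => (s, (pairs.filter (fun p => p.1 == s)).map (fun p => p.2))) := by
  have hmod : (pairs.foldl (fun r p => r.insert p.1 (r.getD p.1 [] ++ [p.2]))
        (PySem.Dict.empty : PySem.Dict Int (List String)))
      = pairs.foldl (fun r p => r.modify p.1 [] (· ++ [p.2])) PySem.Dict.empty := rfl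
  rw [hmod]
  have hnodup : (pairs.foldl (fun r p => r.modify p.1 [] (· ++ [p.2]))
        (PySem.Dict.empty : PySem.Dict Int (List String))).keys.Nodup :=
    PySem.Dict.nodup_keys_foldl_modify_key pairs (fun p => p.1) [] (fun _ p => (· ++ [p.2]))
      PySem.Dict.empty (by simp [pysem])
  rw [PySem.Dict.items_eq_map_keys _ hnodup []]
  have hkeys : (pairs.foldl (fun r p => r.modify p.1 [] (· ++ [p.2]))
        (PySem.Dict.empty : PySem.Dict Int (List String))).keys
      = PySem.List.dedup (pairs.map (fun p => p.1)) := by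
    rw [PySem.Dict.keys_foldl_modify_key pairs (fun p => p.1) [] (fun _ p => (· ++ [p.2]))]
    simp only [pysem, PySem.Dict.keys_empty, PySem.Set.update]
    rw [show PySem.Set.ofList (pairs.map (fun p => p.1))
          = List.foldl PySem.Set.add [] (pairs.map (fun p => p.1)) from rfl, List.foldl_map]
  rw [hkeys]
  refine List.map_congr_left (fun s _ => ?_)
  rw [PySem.Dict.getD_foldl_modify_append pairs PySem.Dict.empty s]
  simp [pysem]

-- ===== VERDICT (by name: the statement is the Claim_ definition above) =====
theorem sum_dict_combinations_spec : Claim_equal_sum_dict_combinations := by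
  intro input_dict _
  unfold Spec_sum_dict_combinations sum_dict_combinations sum_dict_combinations_alt
  rw [← pv_group_items, List.foldl_map]
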